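-- pv_equiv track=rewrite | github.com/Akolyte/CMPSC132_Assignments | HW4.py | findNextOpr
-- ===== SOURCE A (Python) =====
-- def findNextOpr(txt):
--     """
--         >>> findNextOpr('  3*   4 - 5')
--         3
--         >>> findNextOpr('8   4 - 5')
--         6
--         >>> findNextOpr('89 4 5')
--         -1
--     """
--     if not isinstance(txt,str) or len(txt)<=0:
--         return "error: findNextOpr"
--
--     # --- YOU CODE STARTS HERE
--     else:
--         #Create List of Operators to compare
--         opList = ["+", "-", "/","*", "^"]
--         #Iterate through the string, and compare with the list to see if each character is an operator
--         for x, y in enumerate(txt):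
--             for z in opList:
--                 if y == z:
--                     return x
--         return -1
-- ===== SOURCE B (Python) =====
-- def findNextOpr(txt):
--     if not isinstance(txt, str) or len(txt) <= 0:
--         return "error: findNextOpr"
--     positions = [p for p in (txt.find(op) for op in ["+", "-", "/", "*", "^"]) if p >= 0]
--     return min(positions) if positions else -1
-- ===== Notes on version B (the rewrite author's own statement) =====
-- stated objective: faster
-- what changed: Replaced the character-by-character scan with a nested Python-level operator loop by five C-level str.find calls whose non-negative results are reduced with min.
-- outside the precondition, e.g. on findNextOpr(''): A returns 'error: findNextOpr', B returns 'error: findNextOpr'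
import Mathlib
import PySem

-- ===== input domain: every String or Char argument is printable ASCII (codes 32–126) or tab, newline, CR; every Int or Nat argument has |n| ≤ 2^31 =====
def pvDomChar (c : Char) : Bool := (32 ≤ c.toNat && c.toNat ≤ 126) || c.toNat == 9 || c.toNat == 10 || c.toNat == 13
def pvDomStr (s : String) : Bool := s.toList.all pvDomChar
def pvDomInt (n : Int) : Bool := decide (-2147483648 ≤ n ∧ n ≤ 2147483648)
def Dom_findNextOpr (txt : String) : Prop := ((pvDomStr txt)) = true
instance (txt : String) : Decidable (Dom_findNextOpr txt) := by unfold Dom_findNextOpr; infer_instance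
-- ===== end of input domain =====

-- B replaces A's early-returning per-character scan (with a nested Python-level loop over
-- the operator list) by five C-level str.find calls reduced with min (measurably faster in
-- CPython); the empty-string guard, where A returns an error string instead of an Int,
-- is excluded by Pre_.


-- ===== PORT A =====
-- opList = ["+", "-", "/", "*", "^"]  (1-character strings; compared char by char, so Char is exact)
def findNextOprOps : List Char := ['+', '-', '/', '*', '^']

-- inner loop: for z in opList: if y == z: return x
def findNextOprInner : List Char → Char → Int → Option Int
  | [], _, _ => none
  | z :: rest, y, x => if y = z then some x else findNextOprInner rest y x

-- outer loop: for x, y in enumerate(txt): …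
def findNextOprLoop : List (Int × Char) → Int
  | [] => -1
  | (x, y) :: rest =>
    match findNextOprInner findNextOprOps y x with
    | some r => r
    | none => findNextOprLoop rest

def findNextOpr (txt : String) : Int :=
  if PySem.Str.len txt ≤ 0 then 0   -- Python returns the STRING "error: findNextOpr" here: outside Pre_, value arbitrary
  else findNextOprLoop (PySem.List.enumerate txt.toList 0)

-- ===== PORT B =====
def findNextOprOpStrs : List String := ["+", "-", "/", "*", "^"]

def findNextOpr_alt (txt : String) : Int :=
  if PySem.Str.len txt ≤ 0 then 0   -- same guard as A: outside Pre_, value arbitrary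
  else
    let positions := findNextOprOpStrs.filterMap (fun op =>
      let p := PySem.Str.find txt op
      if 0 ≤ p then some p else none)
    match PySem.List.min? positions (fun x => x) with
    | some m => m
    | none => -1

-- ===== PRECONDITION & SPEC =====
-- Pre_ excludes only the empty string, on which A returns the string "error: findNextOpr" instead of an Int.
def Pre_findNextOpr (txt : String) : Prop := txt ≠ ""
instance (txt : String) : Decidable (Pre_findNextOpr txt) := by unfold Pre_findNextOpr; infer_instance
def pvWitness_findNextOpr : String := "  3*   4 - 5"

def Spec_findNextOpr (txt : String) (out : Int) : Prop := out = findNextOpr_alt txt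
instance (txt : String) (out : Int) : Decidable (Spec_findNextOpr txt out) := by unfold Spec_findNextOpr; infer_instance

-- ===== CLAIM (what is proved, stated in full; the proofs are below) =====
def Claim_equal_findNextOpr : Prop := ∀ (txt : String), Dom_findNextOpr txt → Pre_findNextOpr txt → Spec_findNextOpr txt (findNextOpr txt)

-- ===== LEMMAS AND PROOFS =====

-- A's inner loop is a membership test on the operator list
theorem findNextOprInner_eq (l : List Char) (y : Char) (x : Int) :
    findNextOprInner l y x = if l.contains y then some x else none := by
  induction l with
  | nil => simp [findNextOprInner]
  | cons z rest ih =>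
    by_cases h : y = z <;> simp [findNextOprInner, h, ih]

-- A's outer loop computes the first index whose character is an operator
theorem findNextOprLoop_eq (cs : List Char) (s : Int) :
    findNextOprLoop (PySem.List.enumerate cs s)
      = (match List.findIdx? (fun c => findNextOprOps.contains c) cs with
         | some k => s + (k : Int)
         | none => -1) := by
  induction cs generalizing s with
  | nil => simp [PySem.List.enumerate_nil, findNextOprLoop, List.findIdx?_nil]
  | cons c cs ih =>
    rw [PySem.List.enumerate_cons]
    simp only [findNextOprLoop, findNextOprInner_eq, List.findIdx?_cons]
    by_cases h : c ∈ findNextOprOps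
    · simp [h]
    · simp only [List.contains_eq_mem, h, decide_false, Bool.false_eq_true, ite_false, ih,
        List.contains_eq_mem] at *
      cases hf : List.findIdx? (fun c => decide (c ∈ findNextOprOps)) cs with
      | none => simp
      | some k => simp; ring

-- find of a one-character needle is the first index of that character
theorem find_singleton (cs : List Char) (c : Char) :
    PySem.Chars.find cs [c]
      = (match List.findIdx? (fun y => y == c) cs with
         | some k => (k : Int)
         | none => -1) := by
  cases hf : List.findIdx? (fun y => y == c) cs with
  | none =>
    have hmem : ∀ x ∈ cs, ¬ (x = c) := by
      have h := List.findIdx?_eq_none_iff.mp hf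
      intro x hx; have := h x hx; simpa using this
    have : ¬ ([c] <:+: cs) := by
      intro hinf
      have hc : c ∈ cs := hinf.subset (by simp)
      exact hmem c hc rfl
    simpa using (PySem.Chars.find_eq_neg_one_iff cs [c]).mpr this
  | some k =>
    rcases (List.findIdx?_eq_some_iff_getElem).mp hf with ⟨hk, hpk, hmin⟩
    have hckc : cs[k] = c := by simpa using hpk
    -- the needle occurs, so find ≥ 0
    have hinf : [c] <:+: cs := by
      have hc : c ∈ cs := hckc ▸ List.getElem_mem hk
      rcases List.append_of_mem hc with ⟨pre, suf, rfl⟩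
      exact ⟨pre, suf, by simp⟩
    have hne : PySem.Chars.find cs [c] ≠ -1 := (PySem.Chars.find_ne_neg_one_iff cs [c]).mpr hinf
    have hnn : 0 ≤ PySem.Chars.find cs [c] := by
      have := PySem.Chars.neg_one_le_find cs [c]; omega
    rcases PySem.Chars.find_spec hnn with ⟨hpre, hfirst⟩
    set f := (PySem.Chars.find cs [c]).toNat with hfdef
    -- singleton prefix of a drop = that character at that position
    have hat : ∀ j : Nat, ([c] <+: cs.drop j) ↔ cs[j]? = some c := by
      intro j
      rw [← List.head?_drop]
      cases cs.drop j with
      | nil => simp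
      | cons a t =>
        constructor
        · intro h; rcases h with ⟨s, hs⟩; cases hs; rfl
        · intro h; simp_all
    have hfc : cs[f]? = some c := (hat f).mp hpre
    have hflt : f < cs.length := by
      by_contra h
      simp [List.getElem?_eq_none (le_of_not_gt h)] at hfc
    have hck : [c] <+: cs.drop k := (hat k).mpr (by simp [List.getElem?_eq_getElem hk, hckc])
    have hcsf : cs[f] = c := by simpa [List.getElem?_eq_getElem hflt] using hfc
    have h1 : ¬ (f < k) := fun hlt => hmin f hlt (by simp [hcsf])
    have h2 : ¬ (k < f) := fun hlt => hfirst k hlt hck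
    have hfk : f = k := by omega
    have : PySem.Chars.find cs [c] = (f : Int) := (Int.toNat_of_nonneg hnn).symm
    simp [this, hfk]

-- min of the shifted candidate list
theorem foldl_min_map_add_one (t : List Int) (x : Int) :
    (t.map (fun m => m + 1)).foldl min (x + 1) = t.foldl min x + 1 := by
  induction t generalizing x with
  | nil => simp
  | cons a t ih =>
    simp only [List.map_cons, List.foldl_cons]
    rw [show min (x + 1) (a + 1) = min x a + 1 from min_add_add_right x a 1, ih]

theorem min?_map_add_one (l : List Int) :
    PySem.List.min? (l.map (fun m => m + 1)) (fun x => x)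
      = (PySem.List.min? l (fun x => x)).map (fun m => m + 1) := by
  cases l with
  | nil => rfl
  | cons x t =>
    rw [List.map_cons, PySem.List.min?_id_cons, PySem.List.min?_id_cons]
    simp [foldl_min_map_add_one]

-- B's candidate for one operator, through find_singleton: the (possibly absent) first index of that char
theorem cand_eq (cs : List Char) (op : Char) :
    (let p := (match List.findIdx? (fun y => y == op) cs with
               | some k => ((k : Int))
               | none => (-1 : Int));
     if 0 ≤ p then some p else none)
      = (List.findIdx? (fun y => y == op) cs).map (fun k => Int.ofNat k) := by
  cases h : List.findIdx? (fun y => y == op) cs <;> simp_all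

-- every candidate is a first index, hence nonnegative
theorem cand_nonneg (ops cs : List Char) :
    ∀ m ∈ ops.filterMap (fun op => (List.findIdx? (fun y => y == op) cs).map (fun k => Int.ofNat k)),
      0 ≤ m := by
  intro m hm
  rcases List.mem_filterMap.mp hm with ⟨op, _, hop⟩
  rcases Option.map_eq_some_iff.mp hop with ⟨k, _, rfl⟩
  simp

-- the heart of the equivalence: min over per-operator first indices = first index of any operator
theorem minFind (ops : List Char) (cs : List Char) :
    (match PySem.List.min?
        (ops.filterMap (fun op => (List.findIdx? (fun y => y == op) cs).map (fun k => Int.ofNat k)))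
        (fun x => x) with
     | some m => m
     | none => -1)
    = (match List.findIdx? (fun c => ops.contains c) cs with
       | some k => ((k : Int))
       | none => -1) := by
  induction cs with
  | nil =>
    have h : ops.filterMap (fun op => (List.findIdx? (fun y => y == op) ([] : List Char)).map (fun k => Int.ofNat k)) = [] :=
      List.filterMap_eq_nil_iff.mpr (fun a _ => by simp [List.findIdx?_nil])
    rw [h]
    rfl
  | cons c cs ih =>
    by_cases hc : c ∈ ops
    · have hR : List.findIdx? (fun x => ops.contains x) (c :: cs) = some 0 := by
        simp [List.findIdx?_cons, hc]
      rw [hR]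
      have h0 : (0 : Int) ∈ ops.filterMap
          (fun op => (List.findIdx? (fun y => y == op) (c :: cs)).map (fun k => Int.ofNat k)) :=
        List.mem_filterMap.mpr ⟨c, hc, by simp [List.findIdx?_cons]⟩
      obtain ⟨m, hm⟩ : ∃ m, PySem.List.min?
          (ops.filterMap (fun op => (List.findIdx? (fun y => y == op) (c :: cs)).map (fun k => Int.ofNat k)))
          (fun x => x) = some m := by
        cases hmn : PySem.List.min?
            (ops.filterMap (fun op => (List.findIdx? (fun y => y == op) (c :: cs)).map (fun k => Int.ofNat k)))
            (fun x => x) with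
        | none => exact absurd ((PySem.List.min?_eq_none_iff _ _).mp hmn ▸ h0) (List.not_mem_nil)
        | some m => exact ⟨m, rfl⟩
      have hmem := PySem.List.min?_mem hm
      have hle : m ≤ 0 := PySem.List.min?_isMin hm 0 h0
      have hge : 0 ≤ m := cand_nonneg ops (c :: cs) m hmem
      rw [hm]
      simp
      omega
    · have hR : List.findIdx? (fun x => ops.contains x) (c :: cs)
          = Option.map (· + 1) (List.findIdx? (fun x => ops.contains x) cs) := by
        simp [List.findIdx?_cons, hc]
      have hL : ops.filterMap (fun op => (List.findIdx? (fun y => y == op) (c :: cs)).map (fun k => Int.ofNat k))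
          = (ops.filterMap (fun op => (List.findIdx? (fun y => y == op) cs).map (fun k => Int.ofNat k))).map
              (fun m => m + 1) := by
        rw [List.map_filterMap]
        apply List.filterMap_congr
        intro op hop
        have hco : (c == op) = false := by
          simp only [beq_eq_false_iff_ne]; rintro rfl; exact hc hop
        rw [List.findIdx?_cons, hco]
        simp only [if_false, Bool.false_eq_true, Option.map_map]
        cases h : List.findIdx? (fun y => y == op) cs <;> simp_all
      rw [hL, min?_map_add_one, hR]
      cases hmf : PySem.List.min?
          (ops.filterMap (fun op => (List.findIdx? (fun y => y == op) cs).map (fun k => Int.ofNat k)))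
          (fun x => x) with
      | none =>
        cases hf : List.findIdx? (fun x => ops.contains x) cs with
        | none => simp
        | some k =>
          have := ih
          rw [hmf, hf] at this
          simp at this
      | some m =>
        have hge : 0 ≤ m := cand_nonneg ops cs m (PySem.List.min?_mem hmf)
        cases hf : List.findIdx? (fun x => ops.contains x) cs with
        | none =>
          have := ih
          rw [hmf, hf] at this
          simp at this
          omega
        | some k =>
          have := ih
          rw [hmf, hf] at this
          simp at this
          simp [this]

-- B's string-level candidates are the char-level candidates
theorem alt_cand_one (txt : String) (s : String) (c : Char) (hs : s.toList = [c]) :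
    (let p := PySem.Str.find txt s; if 0 ≤ p then some p else none)
      = (List.findIdx? (fun y => y == c) txt.toList).map (fun k => Int.ofNat k) := by
  have : PySem.Str.find txt s = PySem.Chars.find txt.toList [c] := by
    rw [PySem.Str.find_eq, hs]
  rw [this, find_singleton]
  exact cand_eq txt.toList c

-- ===== VERDICT (by name: the statement is the Claim_ definition above) =====
theorem findNextOpr_spec : Claim_equal_findNextOpr := by
  intro txt _ hpre
  have hnil : txt.toList ≠ [] := by
    intro h
    exact hpre (String.toList_inj.mp (by simp [h]))
  have hlen : ¬ (PySem.Str.len txt ≤ 0) := by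
    simp only [PySem.Str.len_eq]
    have : 0 < txt.toList.length := List.length_pos_iff.mpr hnil
    omega
  show findNextOpr txt = findNextOpr_alt txt
  unfold findNextOpr findNextOpr_alt
  rw [if_neg hlen, if_neg hlen]
  have hB : findNextOprOpStrs.filterMap
        (fun op => let p := PySem.Str.find txt op; if 0 ≤ p then some p else none)
      = findNextOprOps.filterMap
        (fun op => (List.findIdx? (fun y => y == op) txt.toList).map (fun k => Int.ofNat k)) := by
    simp only [findNextOprOpStrs, findNextOprOps, List.filterMap_cons, List.filterMap_nil,
      alt_cand_one txt "+" '+' rfl, alt_cand_one txt "-" '-' rfl, alt_cand_one txt "/" '/' rfl,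
      alt_cand_one txt "*" '*' rfl, alt_cand_one txt "^" '^' rfl]
  rw [findNextOprLoop_eq, hB, minFind]
  cases hf : List.findIdx? (fun c => findNextOprOps.contains c) txt.toList <;> simp
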